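-- pv_equiv track=rewrite | github.com/Sayeem2004/CodingBat | Python/p224367.py | noConsecutiveCaps
-- ===== SOURCE A (Python) =====
-- def noConsecutiveCaps(s):
--   x = 0
--   for i in s:
--     if 91 > ord(i) > 64:
--       x = x + 1
--     else:
--       if x == 0:
--         x = 0
--       else:
--         x = x - 1
--     if x == 2:
--       return False
--   return True
-- ===== SOURCE B (Python) =====
-- def noConsecutiveCaps(s):
--   return not any('A' <= a <= 'Z' and 'A' <= b <= 'Z' for a, b in zip(s, s[1:]))
-- ===== Notes on version B (the rewrite author's own statement) =====
-- stated objective: idiomatic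
-- what changed: Replaced the stateful running counter (incremented on caps, decremented otherwise, early-return at 2) by a direct scan of adjacent character pairs via zip(s, s[1:]) testing whether any pair is two ASCII uppercase letters.
import Mathlib
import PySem

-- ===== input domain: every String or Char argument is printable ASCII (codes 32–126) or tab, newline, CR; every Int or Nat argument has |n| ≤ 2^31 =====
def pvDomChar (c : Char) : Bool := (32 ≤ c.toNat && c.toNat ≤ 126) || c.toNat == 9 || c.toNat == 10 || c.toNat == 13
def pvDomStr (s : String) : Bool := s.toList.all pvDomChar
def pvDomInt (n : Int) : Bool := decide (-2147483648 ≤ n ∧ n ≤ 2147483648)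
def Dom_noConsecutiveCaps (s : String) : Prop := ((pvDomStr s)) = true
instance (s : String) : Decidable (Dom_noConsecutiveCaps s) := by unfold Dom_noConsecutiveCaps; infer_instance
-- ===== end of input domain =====

-- B replaces A's running counter with an any-scan over adjacent character pairs (idiomatic, same cost).


-- ===== PORT A =====
-- A's loop: counter x, +1 on a capital (65 ≤ ord < 91), saturating -1 otherwise; early False at x = 2.
def noConsecutiveCapsLoop : List Char → Int → Bool
  | [], _ => true
  | c :: rest, x =>
    let x' : Int := if 91 > (c.toNat : Int) ∧ (c.toNat : Int) > 64 then x + 1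
                    else (if x = 0 then 0 else x - 1)
    if x' = 2 then false else noConsecutiveCapsLoop rest x'

def noConsecutiveCaps (s : String) : Bool := noConsecutiveCapsLoop s.toList 0

-- ===== PORT B =====
-- zip(s, s[1:]); s[1:] is PySem.List.slice from 1
def noConsecutiveCaps_alt (s : String) : Bool :=
  !((s.toList.zip (PySem.List.slice s.toList (some 1) none)).any
      (fun p => ('A' ≤ p.1 && p.1 ≤ 'Z') && ('A' ≤ p.2 && p.2 ≤ 'Z')))

-- ===== PRECONDITION & SPEC =====
def Spec_noConsecutiveCaps (s : String) (out : Bool) : Prop := out = noConsecutiveCaps_alt s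
instance (s : String) (out : Bool) : Decidable (Spec_noConsecutiveCaps s out) := by unfold Spec_noConsecutiveCaps; infer_instance

-- ===== CLAIM (what is proved, stated in full; the proofs are below) =====
def Claim_equal_noConsecutiveCaps : Prop := ∀ (s : String), Dom_noConsecutiveCaps s → Spec_noConsecutiveCaps s (noConsecutiveCaps s)

-- ===== LEMMAS AND PROOFS =====

-- B's pair test on one character, as a Bool
def pvCap (c : Char) : Bool := ('A' ≤ c && c ≤ 'Z')

-- B's result on a plain char list
def pvB0 (cs : List Char) : Bool :=
  !((cs.zip cs.tail).any (fun p => pvCap p.1 && pvCap p.2))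

theorem pvCap_iff (c : Char) : pvCap c = true ↔ (c.toNat < 91 ∧ 64 < c.toNat) := by
  simp only [pvCap, Bool.and_eq_true, decide_eq_true_eq, Char.le_def, UInt32.le_iff_toNat_le,
    Char.toNat, show ('A'.val.toNat) = 65 from rfl, show ('Z'.val.toNat) = 90 from rfl]
  omega

theorem pvLoop_eq (cs : List Char) :
    noConsecutiveCapsLoop cs 0 = pvB0 cs ∧
    noConsecutiveCapsLoop cs 1 =
      (match cs with
       | [] => true
       | d :: _ => if pvCap d then false else pvB0 cs) := by
  induction cs with
  | nil => simp [noConsecutiveCapsLoop, pvB0]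
  | cons c rest ih =>
    obtain ⟨ih0, ih1⟩ := ih
    by_cases hc : pvCap c = true
    · have hc' : c.toNat < 91 ∧ 64 < c.toNat := (pvCap_iff c).mp hc
      constructor
      · rw [show noConsecutiveCapsLoop (c :: rest) 0 = noConsecutiveCapsLoop rest 1 by
          simp [noConsecutiveCapsLoop, hc'.1, hc'.2]]
        rw [ih1]
        cases rest with
        | nil => simp [pvB0]
        | cons d r2 =>
          by_cases hd : pvCap d = true <;> simp [pvB0, hd, hc]
      · simp [noConsecutiveCapsLoop, hc'.1, hc'.2, hc]
    · have hc' : ¬ (c.toNat < 91 ∧ 64 < c.toNat) := fun h => hc ((pvCap_iff c).mpr h)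
      have hcf : pvCap c = false := by simpa using hc
      have hB : pvB0 (c :: rest) = pvB0 rest := by
        cases rest with
        | nil => simp [pvB0]
        | cons d r2 => simp [pvB0, hcf]
      constructor
      · rw [show noConsecutiveCapsLoop (c :: rest) 0 = noConsecutiveCapsLoop rest 0 by
          simp [noConsecutiveCapsLoop, hc']]
        rw [ih0, hB]
      · rw [show noConsecutiveCapsLoop (c :: rest) 1 = noConsecutiveCapsLoop rest 0 by
          simp [noConsecutiveCapsLoop, hc']]
        rw [ih0]
        simp [hcf, hB]

theorem pvAlt_eq (s : String) : noConsecutiveCaps_alt s = pvB0 s.toList := by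
  simp [noConsecutiveCaps_alt, pvB0, pvCap, PySem.List.slice_from_one]

-- ===== VERDICT (by name: the statement is the Claim_ definition above) =====
theorem noConsecutiveCaps_spec : Claim_equal_noConsecutiveCaps := by
  intro s _
  unfold Spec_noConsecutiveCaps noConsecutiveCaps
  rw [pvAlt_eq, (pvLoop_eq s.toList).1]
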